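-- pv_equiv track=rewrite | github.com/wtfloris/hestia | hestia/hestia_utils/parser.py | _substitute_nuxt_vars
-- ===== SOURCE A (Python) =====
-- def _substitute_nuxt_vars(js_text, mapping):
--     """Replace unquoted variable references in JS text with their mapped string values.
--     Properly skips quoted strings to avoid corrupting literal values."""
--     result = []
--     i = 0
--     n = len(js_text)
--     while i < n:
--         c = js_text[i]
--         if c in ('"', "'"):
--             quote = c
--             j = i + 1
--             while j < n:
--                 if js_text[j] == '\\' and j + 1 < n:
--                     j += 2
--                 elif js_text[j] == quote:
--                     j += 1
--                     break
--                 else: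
--                     j += 1
--             result.append(js_text[i:j])
--             i = j
--         elif c.isalpha() or c in ('_', '$'):
--             j = i + 1
--             while j < n and (js_text[j].isalnum() or js_text[j] in ('_', '$')):
--                 j += 1
--             ident = js_text[i:j]
--             if ident in ('true', 'false', 'null', 'undefined'):
--                 result.append(ident)
--             elif ident in mapping:
--                 val = mapping[ident]
--                 val = val.replace('\\', '\\\\').replace('"', '\\"').replace('\n', '\\n').replace('\r', '\\r')
--                 result.append(f'"{val}"')
--             else:
--                 result.append(ident)
--             i = j
--         else:
--             result.append(c)
--             i += 1
--     return ''.join(result)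
-- ===== SOURCE B (Python) =====
-- def _substitute_nuxt_vars(js_text, mapping):
--     """Single-pass character state machine: instead of nested index loops with
--     slicing, fold over the characters with a mode (in-string / in-identifier /
--     plain) and flush identifier buffers through the mapping."""
--     KEYWORDS = ('true', 'false', 'null', 'undefined')
--     out = []
--     ident = []      # current identifier buffer (empty = not in an identifier)
--     quote = ''      # current string quote char, '' when outside a string
--     esc = False     # previous char inside the string was an unconsumed backslash
--
--     def flush():
--         if ident:
--             name = ''.join(ident)
--             if name not in KEYWORDS and name in mapping:
--                 val = mapping[name]
--                 val = val.replace('\\', '\\\\').replace('"', '\\"').replace('\n', '\\n').replace('\r', '\\r')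
--                 out.append('"' + val + '"')
--             else:
--                 out.append(name)
--             ident.clear()
--
--     for c in js_text:
--         if quote:
--             out.append(c)
--             if esc:
--                 esc = False
--             elif c == '\\':
--                 esc = True
--             elif c == quote:
--                 quote = ''
--         elif ident and (c.isalnum() or c in '_$'):
--             ident.append(c)
--         else:
--             flush()
--             if c in ('"', "'"):
--                 quote = c
--                 esc = False
--                 out.append(c)
--             elif c.isalpha() or c in '_$':
--                 ident.append(c)
--             else:
--                 out.append(c)
--     flush()
--     return ''.join(out)
-- ===== Notes on version B (the rewrite author's own statement) =====
-- stated objective: alternative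
-- what changed: Replaces A's index-driven scan (outer while with nested inner while loops and string slicing) by a single left-to-right fold over the characters with an explicit lexer state (in-string quote/escape flags and an identifier buffer flushed through the mapping).
import Mathlib
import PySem

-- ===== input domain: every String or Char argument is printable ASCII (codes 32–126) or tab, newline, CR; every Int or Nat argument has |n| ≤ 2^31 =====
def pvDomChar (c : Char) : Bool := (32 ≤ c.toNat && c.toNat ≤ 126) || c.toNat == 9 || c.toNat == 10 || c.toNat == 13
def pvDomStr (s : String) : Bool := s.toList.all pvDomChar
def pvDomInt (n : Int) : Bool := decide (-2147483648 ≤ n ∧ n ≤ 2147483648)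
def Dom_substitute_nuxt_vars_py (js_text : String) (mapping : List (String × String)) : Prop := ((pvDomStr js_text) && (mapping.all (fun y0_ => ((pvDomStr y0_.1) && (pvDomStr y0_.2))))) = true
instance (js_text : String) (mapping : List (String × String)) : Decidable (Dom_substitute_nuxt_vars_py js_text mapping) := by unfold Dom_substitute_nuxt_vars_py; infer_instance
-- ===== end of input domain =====

-- B replaces A's index-driven scan (nested while loops with slicing) by a single
-- left-to-right fold over the characters with an explicit lexer state; same output.

-- shared character classes and the substitution of one identifier token
-- (these lines are literally identical in both Pythons)
def pvIdentCont (c : Char) : Bool := PySem.Chars.isalnum c || c == '_' || c == '$'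
def pvIdentStart (c : Char) : Bool := PySem.Chars.isalpha c || c == '_' || c == '$'
def pvKeyword (s : String) : Bool := s == "true" || s == "false" || s == "null" || s == "undefined"
def pvEscape (v : String) : String :=
  PySem.Str.replace (PySem.Str.replace (PySem.Str.replace (PySem.Str.replace v "\\" "\\\\") "\"" "\\\"") "\n" "\\n") "\r" "\\r"
def pvSubstToken (mapping : List (String × String)) (ident : List Char) : List Char :=
  let name := String.mk ident
  if pvKeyword name then ident
  else
    match mapping.find? (fun p => p.1 == name) with
    | some p => '"' :: (pvEscape p.2).toList ++ ['"']
    | none => ident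

-- ===== PORT A =====  (index loop with inner while-scans and slices, as in the Python)
def pvA_strEnd (cs : List Char) (quote : Char) (j : Nat) : Nat :=
  if _h : j < cs.length then
    if cs.getD j ' ' == '\\' && decide (j + 1 < cs.length) then pvA_strEnd cs quote (j + 2)
    else if cs.getD j ' ' == quote then j + 1
    else pvA_strEnd cs quote (j + 1)
  else j
termination_by cs.length - j
decreasing_by all_goals omega

def pvA_identEnd (cs : List Char) (j : Nat) : Nat :=
  if h : j < cs.length ∧ pvIdentCont (cs.getD j ' ') then pvA_identEnd cs (j + 1) else j
termination_by cs.length - j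
decreasing_by omega

theorem pvA_strEnd_ge (cs : List Char) (q : Char) (j : Nat) : j ≤ pvA_strEnd cs q j := by
  fun_induction pvA_strEnd cs q j <;> omega

theorem pvA_identEnd_ge (cs : List Char) (j : Nat) : j ≤ pvA_identEnd cs j := by
  fun_induction pvA_identEnd cs j <;> omega

def pvA_loop (cs : List Char) (mapping : List (String × String)) (i : Nat)
    (result : List (List Char)) : List (List Char) :=
  if _h : i < cs.length then
    if cs.getD i ' ' == '"' || cs.getD i ' ' == '\'' then
      pvA_loop cs mapping (pvA_strEnd cs (cs.getD i ' ') (i + 1))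
        (result ++ [(cs.drop i).take (pvA_strEnd cs (cs.getD i ' ') (i + 1) - i)])
    else if pvIdentStart (cs.getD i ' ') then
      pvA_loop cs mapping (pvA_identEnd cs (i + 1))
        (result ++ [pvSubstToken mapping ((cs.drop i).take (pvA_identEnd cs (i + 1) - i))])
    else
      pvA_loop cs mapping (i + 1) (result ++ [[cs.getD i ' ']])
  else result
termination_by cs.length - i
decreasing_by
  · have := pvA_strEnd_ge cs (cs.getD i ' ') (i + 1); omega
  · have := pvA_identEnd_ge cs (i + 1); omega
  · omega

def substitute_nuxt_vars_py (js_text : String) (mapping : List (String × String)) : String :=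
  String.mk ((pvA_loop js_text.toList mapping 0 []).flatten)

-- ===== PORT B =====  (single fold with a lexer state, as in Source B)
structure PVBState where
  out : List (List Char)
  ident : List Char
  quote : Option Char
  esc : Bool
deriving Repr, DecidableEq

def pvB_flush (mapping : List (String × String)) (st : PVBState) : PVBState :=
  if st.ident.isEmpty then st
  else { st with out := st.out ++ [pvSubstToken mapping st.ident], ident := [] }

def pvB_step (mapping : List (String × String)) (st : PVBState) (c : Char) : PVBState :=
  match st.quote with
  | some q =>
    let st' := { st with out := st.out ++ [[c]] }
    if st'.esc then { st' with esc := false }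
    else if c == '\\' then { st' with esc := true }
    else if c == q then { st' with quote := none }
    else st'
  | none =>
    if !st.ident.isEmpty && pvIdentCont c then { st with ident := st.ident ++ [c] }
    else
      let st' := pvB_flush mapping st
      if c == '"' || c == '\'' then { st' with quote := some c, esc := false, out := st'.out ++ [[c]] }
      else if pvIdentStart c then { st' with ident := st'.ident ++ [c] }
      else { st' with out := st'.out ++ [[c]] }

def substitute_nuxt_vars_py_alt (js_text : String) (mapping : List (String × String)) : String :=
  String.mk ((pvB_flush mapping
    (js_text.toList.foldl (pvB_step mapping) ⟨[], [], none, false⟩)).out.flatten)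

-- ===== PRECONDITION & SPEC =====
def Spec_substitute_nuxt_vars_py (js_text : String) (mapping : List (String × String)) (out : String) : Prop := out = substitute_nuxt_vars_py_alt js_text mapping
instance (js_text : String) (mapping : List (String × String)) (out : String) : Decidable (Spec_substitute_nuxt_vars_py js_text mapping out) := by unfold Spec_substitute_nuxt_vars_py; infer_instance

-- ===== CLAIM (what is proved, stated in full; the proofs are below) =====
def Claim_equal_substitute_nuxt_vars_py : Prop := ∀ (js_text : String) (mapping : List (String × String)), Dom_substitute_nuxt_vars_py js_text mapping → Spec_substitute_nuxt_vars_py js_text mapping (substitute_nuxt_vars_py js_text mapping)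

-- ===== LEMMAS AND PROOFS =====

theorem pv_getD_eq (cs : List Char) (i : Nat) (h : i < cs.length) : cs.getD i ' ' = cs[i] := by
  simp [List.getD_eq_getElem?_getD, List.getElem?_eq_getElem h]

theorem pvA_identEnd_le (cs : List Char) (j : Nat) (hj : j ≤ cs.length) :
    pvA_identEnd cs j ≤ cs.length := by
  fun_induction pvA_identEnd cs j <;> omega

theorem pvA_identEnd_stop (cs : List Char) (j : Nat)
    (h : pvA_identEnd cs j < cs.length) :
    pvIdentCont (cs.getD (pvA_identEnd cs j) ' ') = false := by
  revert h
  fun_induction pvA_identEnd cs j with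
  | case1 j hj ih => exact ih
  | case2 j hj =>
    intro h
    simp only [not_and] at hj
    simpa using hj h

-- scanning a quoted string: the machine copies the characters verbatim and either
-- closes the quote (back to the plain state) or runs to the end of the text
theorem pv_strScan (m : List (String × String)) (cs : List Char) (q : Char)
    (hq : q = '"' ∨ q = '\'') :
    ∀ j o, j ≤ cs.length →
      pvA_strEnd cs q j ≤ cs.length ∧
      ((List.foldl (pvB_step m) ⟨o, [], some q, false⟩
          ((cs.drop j).take (pvA_strEnd cs q j - j))
        = ⟨o ++ ((cs.drop j).take (pvA_strEnd cs q j - j)).map (fun c => [c]), [], none, false⟩)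
       ∨ (∃ e, List.foldl (pvB_step m) ⟨o, [], some q, false⟩
            ((cs.drop j).take (pvA_strEnd cs q j - j))
          = ⟨o ++ ((cs.drop j).take (pvA_strEnd cs q j - j)).map (fun c => [c]), [], some q, e⟩
          ∧ pvA_strEnd cs q j = cs.length)) := by
  intro j o
  fun_induction pvA_strEnd cs q j generalizing o with
  | case1 j hlt hc ih =>
    intro hle
    rw [Bool.and_eq_true] at hc
    have hbs : cs[j] = '\\' := by
      have h1 := hc.1; rw [pv_getD_eq cs j hlt] at h1; simpa using h1
    have hj1 : j + 1 < cs.length := by simpa using hc.2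
    have hge : j + 2 ≤ pvA_strEnd cs q (j + 2) := pvA_strEnd_ge cs q (j + 2)
    obtain ⟨hle', _⟩ := ih o (by omega)
    refine ⟨hle', ?_⟩
    rw [List.drop_eq_getElem_cons hlt, List.drop_eq_getElem_cons hj1]
    have hx : pvA_strEnd cs q (j + 2) - j = (pvA_strEnd cs q (j + 2) - (j + 2)) + 1 + 1 := by omega
    rw [hx, List.take_succ_cons, List.take_succ_cons, List.foldl_cons, List.foldl_cons]
    have s1 : pvB_step m ⟨o, [], some q, false⟩ cs[j] = ⟨o ++ [[cs[j]]], [], some q, true⟩ := by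
      simp [pvB_step, hbs]
    have s2 : pvB_step m ⟨o ++ [[cs[j]]], [], some q, true⟩ cs[j + 1]
        = ⟨o ++ [[cs[j]]] ++ [[cs[j + 1]]], [], some q, false⟩ := by
      simp [pvB_step]
    rw [s1, s2]
    obtain ⟨_, h2⟩ := ih (o ++ [[cs[j]]] ++ [[cs[j + 1]]]) (by omega)
    rcases h2 with h2 | ⟨e, h2, hn⟩
    · left; rw [h2]; simp
    · right; exact ⟨e, by rw [h2]; simp, hn⟩
  | case2 j hlt hc1 hc2 =>
    intro hle
    have hcq : cs[j] = q := by
      rw [pv_getD_eq cs j hlt] at hc2; simpa using hc2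
    have hqne : q ≠ '\\' := by rcases hq with h | h <;> (subst h; decide)
    refine ⟨by omega, Or.inl ?_⟩
    rw [List.drop_eq_getElem_cons hlt]
    have hx : j + 1 - j = 1 := by omega
    rw [hx, List.take_succ_cons, List.take_zero, List.foldl_cons, List.foldl_nil]
    simp [pvB_step, hcq, hqne]
  | case3 j hlt hc1 hc2 ih =>
    intro hle
    have hcnq : cs[j] ≠ q := by
      rw [pv_getD_eq cs j hlt] at hc2; simpa using hc2
    by_cases hbs : cs[j] = '\\'
    · -- trailing backslash: j + 1 must be at the end of the text
      have hj1 : ¬ (j + 1 < cs.length) := by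
        intro hlt1
        rw [pv_getD_eq cs j hlt] at hc1
        simp [hbs, hlt1] at hc1
      have hstop : pvA_strEnd cs q (j + 1) = j + 1 := by
        rw [pvA_strEnd.eq_def]; simp [hj1]
      rw [hstop]
      refine ⟨by omega, Or.inr ⟨true, ?_, by omega⟩⟩
      rw [List.drop_eq_getElem_cons hlt]
      have hx : j + 1 - j = 1 := by omega
      rw [hx, List.take_succ_cons, List.take_zero, List.foldl_cons, List.foldl_nil]
      simp [pvB_step, hbs]
    · have hge : j + 1 ≤ pvA_strEnd cs q (j + 1) := pvA_strEnd_ge cs q (j + 1)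
      obtain ⟨hle', h2⟩ := ih (o ++ [[cs[j]]]) (by omega)
      refine ⟨hle', ?_⟩
      rw [List.drop_eq_getElem_cons hlt]
      have hx : pvA_strEnd cs q (j + 1) - j = (pvA_strEnd cs q (j + 1) - (j + 1)) + 1 := by omega
      rw [hx, List.take_succ_cons, List.foldl_cons]
      have s1 : pvB_step m ⟨o, [], some q, false⟩ cs[j] = ⟨o ++ [[cs[j]]], [], some q, false⟩ := by
        simp [pvB_step, hbs, hcnq]
      rw [s1]
      rcases h2 with h2 | ⟨e, h2, hn⟩
      · left; rw [h2]; simp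
      · right; exact ⟨e, by rw [h2]; simp, hn⟩
  | case4 j hlt =>
    intro hle
    have hj : j = cs.length := by omega
    refine ⟨by omega, Or.inr ⟨false, ?_, hj⟩⟩
    simp

-- scanning identifier continuation characters accumulates them in the buffer
theorem pv_identScan (m : List (String × String)) (cs : List Char) :
    ∀ j buf o, j ≤ cs.length → buf ≠ [] →
      List.foldl (pvB_step m) ⟨o, buf, none, false⟩
          ((cs.drop j).take (pvA_identEnd cs j - j))
        = ⟨o, buf ++ (cs.drop j).take (pvA_identEnd cs j - j), none, false⟩ := by
  intro j buf o
  fun_induction pvA_identEnd cs j generalizing buf o with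
  | case1 j hj ih =>
    intro hle hbuf
    obtain ⟨hlt, hcont⟩ := hj
    have hge : j + 1 ≤ pvA_identEnd cs (j + 1) := pvA_identEnd_ge cs (j + 1)
    rw [List.drop_eq_getElem_cons hlt]
    have hx : pvA_identEnd cs (j + 1) - j = (pvA_identEnd cs (j + 1) - (j + 1)) + 1 := by omega
    rw [hx, List.take_succ_cons, List.foldl_cons]
    have hcont' : pvIdentCont cs[j] = true := by rwa [pv_getD_eq cs j hlt] at hcont
    have hb : buf.isEmpty = false := by simpa [List.isEmpty_iff] using hbuf
    simp only [pvB_step, hb, hcont', Bool.not_false, Bool.and_self, if_pos]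
    rw [ih (buf ++ [cs[j]]) o (by omega) (by simp)]
    simp
  | case2 j hj =>
    intro hle hbuf
    simp

-- a step on a non-continuation character first flushes the pending identifier
theorem pv_flushStep (m : List (String × String)) (c : Char) (o : List (List Char))
    (buf : List Char) (h : buf = [] ∨ pvIdentCont c = false) :
    pvB_step m ⟨o, buf, none, false⟩ c
      = pvB_step m ⟨(pvB_flush m ⟨o, buf, none, false⟩).out, [], none, false⟩ c := by
  cases buf with
  | nil => rfl
  | cons a l =>
    rcases h with h | h
    · simp at h
    · simp [pvB_step, pvB_flush, h]

theorem pv_flatten_map_singleton (l : List Char) : (l.map (fun c => [c])).flatten = l := by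
  induction l with
  | nil => simp
  | cons a t ih => simp [ih]

theorem pv_drop_split (cs : List Char) (i j : Nat) (h : i ≤ j) :
    cs.drop i = (cs.drop i).take (j - i) ++ cs.drop j := by
  conv_lhs => rw [← List.take_append_drop (j - i) (cs.drop i)]
  rw [List.drop_drop]
  congr 2
  omega

theorem pv_slice_cons (cs : List Char) (i j : Nat) (hlt : i < cs.length) (h : i + 1 ≤ j) :
    (cs.drop i).take (j - i) = cs[i] :: (cs.drop (i + 1)).take (j - (i + 1)) := by
  rw [List.drop_eq_getElem_cons hlt]
  have hx : j - i = (j - (i + 1)) + 1 := by omega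
  rw [hx, List.take_succ_cons]

theorem pv_mainLoop (m : List (String × String)) (cs : List Char) :
    ∀ i oA oB, i ≤ cs.length → oB.flatten = oA.flatten →
      (pvB_flush m (List.foldl (pvB_step m) ⟨oB, [], none, false⟩ (cs.drop i))).out.flatten
        = (pvA_loop cs m i oA).flatten := by
  intro i oA oB
  fun_induction pvA_loop cs m i oA generalizing oB with
  | case1 i oA hlt hcq ih =>
    intro hle hflat
    rw [pv_getD_eq cs i hlt] at hcq ih ⊢
    have hq' : cs[i] = '"' ∨ cs[i] = '\'' := by simpa using hcq
    have hge : i + 1 ≤ pvA_strEnd cs cs[i] (i + 1) := pvA_strEnd_ge cs cs[i] (i + 1)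
    obtain ⟨hjle, hscan⟩ :=
      pv_strScan m cs cs[i] hq' (i + 1) (oB ++ [[cs[i]]]) (by omega)
    have hslice : (cs.drop i).take (pvA_strEnd cs cs[i] (i + 1) - i)
        = cs[i] :: (cs.drop (i + 1)).take (pvA_strEnd cs cs[i] (i + 1) - (i + 1)) :=
      pv_slice_cons cs i _ hlt hge
    conv_lhs => rw [List.drop_eq_getElem_cons hlt]
    rw [List.foldl_cons]
    have s1 : pvB_step m ⟨oB, [], none, false⟩ cs[i]
        = ⟨oB ++ [[cs[i]]], [], some cs[i], false⟩ := by
      rcases hq' with h | h <;> simp [pvB_step, pvB_flush, h]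
    rw [s1]
    conv_lhs => rw [pv_drop_split cs (i + 1) (pvA_strEnd cs cs[i] (i + 1)) (by omega)]
    rw [List.foldl_append]
    rcases hscan with hs | ⟨e, hs, hn⟩
    · rw [hs]
      apply ih _ hjle
      simp [hslice, hflat, pv_flatten_map_singleton, ← List.map_drop, ← List.map_take]
    · rw [hs]
      have hdj : cs.drop (pvA_strEnd cs cs[i] (i + 1)) = [] := by
        rw [hn, List.drop_length]
      rw [hdj, List.foldl_nil]
      have hA : pvA_loop cs m (pvA_strEnd cs cs[i] (i + 1))
          (oA ++ [(cs.drop i).take (pvA_strEnd cs cs[i] (i + 1) - i)]) =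
          oA ++ [(cs.drop i).take (pvA_strEnd cs cs[i] (i + 1) - i)] := by
        rw [pvA_loop.eq_def, hn]
        simp
      rw [hA]
      simp [pvB_flush, hslice, hflat, pv_flatten_map_singleton, ← List.map_drop, ← List.map_take]
  | case2 i oA hlt hcq hst ih =>
    intro hle hflat
    try simp only [pv_getD_eq cs i hlt] at hcq hst ih ⊢
    have hcq' : (cs[i] == '"' || cs[i] == '\'') = false := by simpa using hcq
    have hst' := hst
    have hge : i + 1 ≤ pvA_identEnd cs (i + 1) := pvA_identEnd_ge cs (i + 1)
    have hjle : pvA_identEnd cs (i + 1) ≤ cs.length := pvA_identEnd_le cs (i + 1) (by omega)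
    have hslice : (cs.drop i).take (pvA_identEnd cs (i + 1) - i)
        = cs[i] :: (cs.drop (i + 1)).take (pvA_identEnd cs (i + 1) - (i + 1)) :=
      pv_slice_cons cs i _ hlt hge
    conv_lhs => rw [List.drop_eq_getElem_cons hlt]
    rw [List.foldl_cons]
    have s1 : pvB_step m ⟨oB, [], none, false⟩ cs[i] = ⟨oB, [cs[i]], none, false⟩ := by
      simp [pvB_step, pvB_flush, hcq', hst']
    rw [s1]
    conv_lhs => rw [pv_drop_split cs (i + 1) (pvA_identEnd cs (i + 1)) (by omega)]
    rw [List.foldl_append]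
    rw [pv_identScan m cs (i + 1) [cs[i]] oB (by omega) (by simp)]
    have hbuf : cs[i] :: (cs.drop (i + 1)).take (pvA_identEnd cs (i + 1) - (i + 1)) ≠ [] := by
      simp
    by_cases hjlt : pvA_identEnd cs (i + 1) < cs.length
    · have hcontf : pvIdentCont cs[pvA_identEnd cs (i + 1)] = false := by
        have := pvA_identEnd_stop cs (i + 1) hjlt
        rwa [pv_getD_eq cs _ hjlt] at this
      conv_lhs => rw [List.drop_eq_getElem_cons hjlt]
      rw [List.foldl_cons]
      rw [show ([cs[i]] ++ (cs.drop (i + 1)).take (pvA_identEnd cs (i + 1) - (i + 1)))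
            = cs[i] :: (cs.drop (i + 1)).take (pvA_identEnd cs (i + 1) - (i + 1)) from rfl]
      rw [pv_flushStep m cs[pvA_identEnd cs (i + 1)] oB _ (Or.inr hcontf)]
      have hfl : (pvB_flush m ⟨oB, cs[i] :: (cs.drop (i + 1)).take (pvA_identEnd cs (i + 1) - (i + 1)),
          none, false⟩).out
          = oB ++ [pvSubstToken m ((cs.drop i).take (pvA_identEnd cs (i + 1) - i))] := by
        simp [pvB_flush, hslice]
      rw [hfl, ← List.foldl_cons, ← List.drop_eq_getElem_cons hjlt]
      apply ih _ hjle
      simp [hflat]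
    · have hj : pvA_identEnd cs (i + 1) = cs.length := by omega
      have hdj : cs.drop (pvA_identEnd cs (i + 1)) = [] := by rw [hj, List.drop_length]
      rw [hdj, List.foldl_nil]
      have hA : pvA_loop cs m (pvA_identEnd cs (i + 1))
          (oA ++ [pvSubstToken m ((cs.drop i).take (pvA_identEnd cs (i + 1) - i))]) =
          oA ++ [pvSubstToken m ((cs.drop i).take (pvA_identEnd cs (i + 1) - i))] := by
        rw [pvA_loop.eq_def, hj]
        simp
      rw [hA]
      simp [pvB_flush, hslice, hflat]
  | case3 i oA hlt hcq hst ih =>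
    intro hle hflat
    try simp only [pv_getD_eq cs i hlt] at hcq hst ih ⊢
    have hcq' : (cs[i] == '"' || cs[i] == '\'') = false := by simpa using hcq
    have hst' := hst
    conv_lhs => rw [List.drop_eq_getElem_cons hlt]
    rw [List.foldl_cons]
    have s1 : pvB_step m ⟨oB, [], none, false⟩ cs[i] = ⟨oB ++ [[cs[i]]], [], none, false⟩ := by
      simp at hcq'
      simp [pvB_step, pvB_flush, hst', hcq'.1, hcq'.2]
    rw [s1]
    apply ih _ (by omega)
    simp [hflat]
  | case4 i oA hlt =>
    intro hle hflat
    have hdj : cs.drop i = [] := by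
      have : i = cs.length := by omega
      rw [this, List.drop_length]
    rw [hdj, List.foldl_nil]
    simpa [pvB_flush] using hflat

-- ===== VERDICT (by name: the statement is the Claim_ definition above) =====
theorem substitute_nuxt_vars_py_spec : Claim_equal_substitute_nuxt_vars_py := by
  intro js_text mapping _
  unfold Spec_substitute_nuxt_vars_py substitute_nuxt_vars_py substitute_nuxt_vars_py_alt
  have h := pv_mainLoop mapping js_text.toList 0 [] [] (Nat.zero_le _) rfl
  simp only [List.drop_zero] at h
  rw [h]
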